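-- pv_equiv track=rewrite | github.com/aw578/bril | cs6120/lesson_4/flow.py | merge_constants
-- ===== SOURCE A (Python) =====
-- def merge_constants(predecessors):
--     final = {}
--     for pred in predecessors:
--         for var in pred:
--             if(var not in final):
--                 final[var] = pred[var]
--             else:
--                 # conflicting values -> ?
--                 if(pred[var] != final[var]):
--                     final[var] = "?"
--     return final
-- ===== SOURCE B (Python) =====
-- def merge_constants(predecessors):
--     # collect every value seen for each variable, then collapse in a second pass
--     seen = {}
--     for pred in predecessors:
--         for var, val in pred.items():
--             seen.setdefault(var, []).append(val)
--     return {var: (vals[0] if all(v == vals[0] for v in vals) else "?")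
--             for var, vals in seen.items()}
-- ===== Notes on version B (the rewrite author's own statement) =====
-- stated objective: alternative
-- what changed: B collects all values per variable into an index in one pass and collapses each value list to its single value or '?' in a second pass, instead of A's eager collapse on the fly.
import Mathlib
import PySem

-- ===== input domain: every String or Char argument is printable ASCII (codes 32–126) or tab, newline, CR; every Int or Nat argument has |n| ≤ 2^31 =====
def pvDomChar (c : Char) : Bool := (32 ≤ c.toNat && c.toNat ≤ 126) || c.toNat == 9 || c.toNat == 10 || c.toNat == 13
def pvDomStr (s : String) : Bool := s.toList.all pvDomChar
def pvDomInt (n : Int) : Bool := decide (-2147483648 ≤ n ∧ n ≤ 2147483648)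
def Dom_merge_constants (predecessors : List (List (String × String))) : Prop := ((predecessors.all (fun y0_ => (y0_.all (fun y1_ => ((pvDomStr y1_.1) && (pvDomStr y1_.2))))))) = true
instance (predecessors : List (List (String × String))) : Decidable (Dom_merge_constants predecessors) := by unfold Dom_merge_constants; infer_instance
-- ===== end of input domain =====

-- B collapses a per-variable value index in a second pass instead of A's eager on-the-fly collapse; same return value, no speed claim.

-- ===== PORT A =====
-- each `pred` is a Python dict: normalize the association list with Dict.ofList (last duplicate wins,
-- first-insertion key order); `for var in pred` with `pred[var]` is iteration over its items.
-- `final[var]` in A is evaluated only when `var in final`, so `getD _ ""` is exact there.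
def merge_constants (predecessors : List (List (String × String))) : List (String × String) :=
  (predecessors.foldl
    (fun final pred =>
      ((PySem.Dict.ofList pred).items).foldl
        (fun final kv =>
          if final.contains kv.1 = false then final.insert kv.1 kv.2
          else if kv.2 ≠ final.getD kv.1 "" then final.insert kv.1 "?"
          else final)
        final)
    PySem.Dict.empty).items

-- ===== PORT B =====
-- vals[0] if all values equal vals[0] else "?"; the [] case is unreachable (seen's lists are nonempty)
def mcCollapse (vals : List String) : String :=
  match vals with
  | [] => "?"
  | v0 :: rest => if rest.all (· == v0) then v0 else "?"

-- seen.setdefault(var, []).append(val) is Dict.modify var [] (· ++ [val]); the final dict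
-- comprehension ranges over seen's (distinct) keys, so its items are exactly this map.
def merge_constants_alt (predecessors : List (List (String × String))) : List (String × String) :=
  ((predecessors.foldl
      (fun seen pred =>
        ((PySem.Dict.ofList pred).items).foldl
          (fun seen kv => seen.modify kv.1 [] (· ++ [kv.2]))
          seen)
      (PySem.Dict.empty : PySem.Dict String (List String))).items).map
    (fun p => (p.1, mcCollapse p.2))

-- ===== PRECONDITION & SPEC =====
def Spec_merge_constants (predecessors : List (List (String × String))) (out : List (String × String)) : Prop := out = merge_constants_alt predecessors
instance (predecessors : List (List (String × String))) (out : List (String × String)) : Decidable (Spec_merge_constants predecessors out) := by unfold Spec_merge_constants; infer_instance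

-- ===== CLAIM (what is proved, stated in full; the proofs are below) =====
def Claim_equal_merge_constants : Prop := ∀ (predecessors : List (List (String × String))), Dom_merge_constants predecessors → Spec_merge_constants predecessors (merge_constants predecessors)

-- ===== LEMMAS AND PROOFS =====



-- collapse applied to the whole index dict
def mcCollapseD (d : PySem.Dict String (List String)) : PySem.Dict String String :=
  PySem.Dict.mk (d.items.map (fun p => (p.1, mcCollapse p.2)))

lemma mc_contains_collapseD (d : PySem.Dict String (List String)) (k : String) :
    (mcCollapseD d).contains k = d.contains k := by
  simp only [mcCollapseD, PySem.Dict.contains, List.any_map]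
  rfl

lemma mc_get?_collapseD (d : PySem.Dict String (List String)) (k : String) :
    (mcCollapseD d).get? k = (d.get? k).map mcCollapse := by
  simp only [mcCollapseD, PySem.Dict.get?, List.find?_map, Option.map_map]
  rfl

lemma mcCollapse_append (vs : List String) (v : String) (h : vs ≠ []) :
    mcCollapse (vs ++ [v]) = if v = mcCollapse vs then mcCollapse vs else "?" := by
  cases vs with
  | nil => exact absurd rfl h
  | cons v0 rest =>
    have e : (v0 :: rest) ++ [v] = v0 :: (rest ++ [v]) := rfl
    rw [e]
    by_cases hall : rest.all (· == v0)
    · by_cases h2 : v = v0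
      · simp [mcCollapse, hall, h2]
      · simp [mcCollapse, List.all_append, hall, h2]
    · simp only [mcCollapse, List.all_append, hall, Bool.false_and]
      split <;> simp_all

lemma mcStep (d : PySem.Dict String (List String)) (k v : String)
    (hnd : d.keys.Nodup) (hne : ∀ p ∈ d.items, p.2 ≠ []) :
    (if (mcCollapseD d).contains k = false then (mcCollapseD d).insert k v
     else if v ≠ (mcCollapseD d).getD k "" then (mcCollapseD d).insert k "?"
     else mcCollapseD d)
    = mcCollapseD (d.modify k [] (· ++ [v])) := by
  cases hc : d.contains k with
  | true =>
    obtain ⟨vs, hvs⟩ : ∃ vs, d.get? k = some vs := by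
      rw [PySem.Dict.contains_eq_isSome_get?] at hc
      exact Option.isSome_iff_exists.mp hc
    have hvsne : vs ≠ [] := hne _ (PySem.Dict.mem_items_of_get?_eq_some d hvs)
    have hgd : d.getD k [] = vs := PySem.Dict.getD_of_get?_eq_some d [] hvs
    have hcc : (mcCollapseD d).contains k = true := by rw [mc_contains_collapseD, hc]
    have hcg : (mcCollapseD d).getD k "" = mcCollapse vs := by
      rw [PySem.Dict.getD_eq_get?_getD, mc_get?_collapseD, hvs]; rfl
    have hmod : d.modify k [] (· ++ [v]) = d.insert k (vs ++ [v]) := by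
      simp [PySem.Dict.modify, hgd]
    rw [hcc, hmod, hcg, if_neg (by simp)]
    have happ := mcCollapse_append vs v hvsne
    by_cases hv : v = mcCollapse vs
    · rw [if_neg (by simp [hv])]
      apply PySem.Dict.ext
      show d.items.map (fun p => (p.1, mcCollapse p.2))
        = ((d.insert k (vs ++ [v])).items).map (fun p => (p.1, mcCollapse p.2))
      rw [PySem.Dict.items_insert_of_contains d (vs ++ [v]) hc, List.map_map]
      refine (List.map_congr_left ?_)
      intro p hp
      by_cases hpk : p.1 = k
      · have hp2 : p.2 = vs := by
          have : d.get? k = some p.2 := by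
            rw [(PySem.Dict.get?_eq_some_iff_mem_items d k p.2 hnd)]
            have : (p.1, p.2) ∈ d.items := hp
            rwa [hpk] at this
          rw [hvs] at this; exact (Option.some_inj.mp this).symm
        have e1 : mcCollapse (vs ++ [v]) = mcCollapse vs := by rw [happ, if_pos hv]
        simp [Function.comp, hpk, hp2, e1]
      · simp [Function.comp, hpk]
    · rw [if_pos hv]
      apply PySem.Dict.ext
      show ((mcCollapseD d).insert k "?").items
        = ((d.insert k (vs ++ [v])).items).map (fun p => (p.1, mcCollapse p.2))
      rw [PySem.Dict.items_insert_of_contains (mcCollapseD d) "?" hcc,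
          PySem.Dict.items_insert_of_contains d (vs ++ [v]) hc, List.map_map]
      show (d.items.map (fun p => (p.1, mcCollapse p.2))).map
            (fun p => if (p.1 == k) = true then (k, "?") else p) = _
      rw [List.map_map]
      refine (List.map_congr_left ?_)
      intro p hp
      by_cases hpk : p.1 = k
      · simp [Function.comp, hpk, happ, hv]
      · simp [Function.comp, hpk]
  | false =>
    have hcc : (mcCollapseD d).contains k = false := by rw [mc_contains_collapseD, hc]
    have hmod : d.modify k [] (· ++ [v]) = d.insert k [v] := by
      simp [PySem.Dict.modify, PySem.Dict.getD_of_not_contains d [] hc]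
    rw [hcc, if_pos rfl, hmod]
    apply PySem.Dict.ext
    show ((mcCollapseD d).insert k v).items = ((d.insert k [v]).items).map (fun p => (p.1, mcCollapse p.2))
    rw [PySem.Dict.items_insert_of_not_contains (mcCollapseD d) v hcc,
        PySem.Dict.items_insert_of_not_contains d [v] hc, List.map_append]
    simp [mcCollapseD, mcCollapse]

-- invariants through one B-step
lemma mcInvStep (d : PySem.Dict String (List String)) (k v : String)
    (hnd : d.keys.Nodup) (hne : ∀ p ∈ d.items, p.2 ≠ []) :
    (d.modify k [] (· ++ [v])).keys.Nodup ∧ ∀ p ∈ (d.modify k [] (· ++ [v])).items, p.2 ≠ [] := by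
  constructor
  · exact PySem.Dict.nodup_keys_insert d k _ hnd
  · intro p hp
    rcases (PySem.Dict.mem_items_insert d k _ p).mp hp with h | ⟨h, _⟩
    · subst h; simp
    · exact hne _ h

lemma mcFold (L : List (String × String)) (d : PySem.Dict String (List String))
    (hnd : d.keys.Nodup) (hne : ∀ p ∈ d.items, p.2 ≠ []) :
    L.foldl (fun final kv =>
        if final.contains kv.1 = false then final.insert kv.1 kv.2
        else if kv.2 ≠ final.getD kv.1 "" then final.insert kv.1 "?"
        else final) (mcCollapseD d)
    = mcCollapseD (L.foldl (fun seen kv => seen.modify kv.1 [] (· ++ [kv.2])) d) := by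
  induction L generalizing d with
  | nil => rfl
  | cons kv L ih =>
    simp only [List.foldl_cons]
    rw [mcStep d kv.1 kv.2 hnd hne]
    exact ih _ (mcInvStep d kv.1 kv.2 hnd hne).1 (mcInvStep d kv.1 kv.2 hnd hne).2

lemma mcFoldInv (L : List (String × String)) (d : PySem.Dict String (List String))
    (hnd : d.keys.Nodup) (hne : ∀ p ∈ d.items, p.2 ≠ []) :
    (L.foldl (fun seen kv => seen.modify kv.1 [] (· ++ [kv.2])) d).keys.Nodup ∧
    ∀ p ∈ (L.foldl (fun seen kv => seen.modify kv.1 [] (· ++ [kv.2])) d).items, p.2 ≠ [] := by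
  induction L generalizing d with
  | nil => exact ⟨hnd, hne⟩
  | cons kv L ih =>
    exact ih _ (mcInvStep d kv.1 kv.2 hnd hne).1 (mcInvStep d kv.1 kv.2 hnd hne).2

lemma mcOuter (preds : List (List (String × String))) (d : PySem.Dict String (List String))
    (hnd : d.keys.Nodup) (hne : ∀ p ∈ d.items, p.2 ≠ []) :
    preds.foldl (fun final pred =>
        ((PySem.Dict.ofList pred).items).foldl (fun final kv =>
          if final.contains kv.1 = false then final.insert kv.1 kv.2
          else if kv.2 ≠ final.getD kv.1 "" then final.insert kv.1 "?"
          else final) final) (mcCollapseD d)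
    = mcCollapseD (preds.foldl (fun seen pred =>
        ((PySem.Dict.ofList pred).items).foldl
          (fun seen kv => seen.modify kv.1 [] (· ++ [kv.2])) seen) d) := by
  induction preds generalizing d with
  | nil => rfl
  | cons pred preds ih =>
    simp only [List.foldl_cons]
    rw [mcFold _ d hnd hne]
    exact ih _ (mcFoldInv _ d hnd hne).1 (mcFoldInv _ d hnd hne).2

-- ===== VERDICT (by name: the statement is the Claim_ definition above) =====
theorem merge_constants_spec : Claim_equal_merge_constants := by
  intro preds _
  show merge_constants preds = merge_constants_alt preds
  unfold merge_constants merge_constants_alt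
  have h0 : (PySem.Dict.empty : PySem.Dict String String) = mcCollapseD PySem.Dict.empty := rfl
  rw [h0, mcOuter preds PySem.Dict.empty (by simp [PySem.Dict.keys, PySem.Dict.empty]) (by simp [PySem.Dict.empty])]
  rfl
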